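-- pv_equiv track=rewrite | github.com/DLatreyte/hugo-site-source | content/premieres-nsi/chap-01/1ère Spé NSI/Chap. 17 - Algorithmes de tri/chap-17-03-statistiques.py | etendue_sans_tri
-- ===== SOURCE A (Python) =====
-- from typing import List
--
-- def etendue_sans_tri(serie: List) -> float:
--     """
--     Détermine l'étendue d'une série statistique pour une série non
--     triée.
--     """
--     val_min = serie[0]
--     val_max = serie[0]
--
--     for i in range(1, len(serie)):
--         if serie[i] < val_min:
--             val_min = serie[i]
--         elif serie[i] > val_max:
--             val_max = serie[i]
--
--     return val_max - val_min
-- ===== SOURCE B (Python) =====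
-- def etendue_sans_tri(serie):
--     """Range of a series: sort, then largest minus smallest."""
--     s = sorted(serie)
--     return s[-1] - s[0]
-- ===== Notes on version B (the rewrite author's own statement) =====
-- stated objective: simpler
-- what changed: Replaces the single-pass running min/max scan with sort-then-take-endpoints: the last element of the sorted copy minus its first element.
import Mathlib
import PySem

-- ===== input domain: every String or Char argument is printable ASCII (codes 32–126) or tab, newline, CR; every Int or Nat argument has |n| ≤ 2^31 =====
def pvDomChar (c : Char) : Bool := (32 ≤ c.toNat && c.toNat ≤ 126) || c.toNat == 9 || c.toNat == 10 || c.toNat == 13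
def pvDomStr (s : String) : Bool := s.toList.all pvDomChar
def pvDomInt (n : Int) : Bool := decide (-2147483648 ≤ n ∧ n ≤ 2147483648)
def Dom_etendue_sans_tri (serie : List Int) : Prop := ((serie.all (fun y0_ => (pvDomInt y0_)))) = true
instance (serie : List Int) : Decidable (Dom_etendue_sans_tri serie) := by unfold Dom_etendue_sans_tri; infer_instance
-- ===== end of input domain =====

-- B computes the range by sorting and subtracting the endpoints instead of A's single running min/max scan (simpler, not faster).
-- Both raise IndexError on the empty list (serie[0] / s[-1]), hence Pre_ excludes [].

-- ===== PORT A =====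
def etendue_sans_tri (serie : List Int) : Int :=
  -- val_min = serie[0]; val_max = serie[0]  (pyGetD's default is unreachable: Pre_ excludes [])
  let val_min : Int := PySem.List.pyGetD serie 0 0
  let val_max : Int := PySem.List.pyGetD serie 0 0
  let st :=
    (PySem.List.pyRange 1 serie.length 1).foldl
      (fun (st : Int × Int) i =>
        let x := PySem.List.pyGetD serie i 0
        if x < st.1 then (x, st.2)
        else if x > st.2 then (st.1, x)
        else st)
      (val_min, val_max)
  st.2 - st.1

-- ===== PORT B =====
def etendue_sans_tri_alt (serie : List Int) : Int :=
  -- s = sorted(serie); return s[-1] - s[0]  (defaults unreachable: Pre_ excludes [])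
  let s := PySem.List.sorted serie (fun x => x) false
  PySem.List.pyGetD s (-1) 0 - PySem.List.pyGetD s 0 0

-- ===== PRECONDITION & SPEC =====
-- Both A and B raise IndexError on the empty list; no other input raises.
def Pre_etendue_sans_tri (serie : List Int) : Prop := serie ≠ []
instance (serie : List Int) : Decidable (Pre_etendue_sans_tri serie) := by unfold Pre_etendue_sans_tri; infer_instance
def pvWitness_etendue_sans_tri : List Int := [3, -1, 4, 1]

def Spec_etendue_sans_tri (serie : List Int) (out : Int) : Prop := out = etendue_sans_tri_alt serie
instance (serie : List Int) (out : Int) : Decidable (Spec_etendue_sans_tri serie out) := by unfold Spec_etendue_sans_tri; infer_instance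

-- ===== CLAIM (what is proved, stated in full; the proofs are below) =====
def Claim_equal_etendue_sans_tri : Prop := ∀ (serie : List Int), Dom_etendue_sans_tri serie → Pre_etendue_sans_tri serie → Spec_etendue_sans_tri serie (etendue_sans_tri serie)

-- ===== LEMMAS AND PROOFS =====

-- A's loop body keeps a (min, max) pair; under the invariant mn ≤ mx it is the pair of running folds.
theorem pvLoopA (t : List Int) : ∀ (mn mx : Int), mn ≤ mx →
    t.foldl (fun (st : Int × Int) x =>
        if x < st.1 then (x, st.2) else if x > st.2 then (st.1, x) else st) (mn, mx)
      = (t.foldl min mn, t.foldl max mx) := by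
  induction t with
  | nil => intro mn mx _; simp
  | cons x t ih =>
    intro mn mx h
    simp only [List.foldl_cons]
    by_cases h1 : x < mn
    · rw [if_pos h1, ih x mx (by omega)]
      congr 1
      · congr 1; omega
      · congr 1; omega
    · rw [if_neg h1]
      by_cases h2 : x > mx
      · rw [if_pos h2, ih mn x (by omega)]
        congr 1
        · congr 1; omega
        · congr 1; omega
      · rw [if_neg h2, ih mn mx h]
        congr 1
        · congr 1; omega
        · congr 1; omega

-- head of sorted(h :: t) is the running minimum of A's scan
theorem pvHead_sorted (h : Int) (t : List Int) :
    (PySem.List.sorted (h :: t) (fun x => x) false).headI = t.foldl min h := by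
  have hne : PySem.List.sorted (h :: t) (fun x => x) false ≠ [] := by
    simp [PySem.List.sorted_eq_nil_iff]
  obtain ⟨m, s, hs⟩ := List.exists_cons_of_ne_nil hne
  rw [hs, List.headI_cons]
  have hmem_m : m ∈ h :: t := by
    have : m ∈ PySem.List.sorted (h :: t) (fun x => x) false := by rw [hs]; simp
    rwa [PySem.List.mem_sorted] at this
  have hmin := PySem.List.foldl_min_le t h
  have hfm : t.foldl min h ∈ h :: t := by
    rcases PySem.List.foldl_min_mem t h with h' | h'
    · rw [h']; simp
    · simp [h']
  have h1 : m ≤ t.foldl min h := PySem.List.key_head_sorted_le (h :: t) (fun x => x) hs _ hfm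
  have h2 : t.foldl min h ≤ m := by
    rcases List.mem_cons.mp hmem_m with rfl | hm
    · exact hmin.1
    · exact hmin.2 m hm
  omega

-- every element of a ≤-sorted list is at most its last element
theorem pvLast_ge (s : List Int) (hpw : s.Pairwise (fun a b => a ≤ b)) (hne : s ≠ [])
    (x : Int) (hx : x ∈ s) : x ≤ s.getLast hne := by
  obtain ⟨i, hi, hget⟩ := List.mem_iff_getElem.mp hx
  rw [List.getLast_eq_getElem, ← hget]
  rcases Nat.lt_or_ge i (s.length - 1) with hlt | hge
  · exact List.pairwise_iff_getElem.mp hpw i (s.length - 1) hi (by omega) hlt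
  · have : i = s.length - 1 := by omega
    simp [this]

-- last of sorted(h :: t) is the running maximum of A's scan
theorem pvLast_sorted (h : Int) (t : List Int)
    (hne : PySem.List.sorted (h :: t) (fun x => x) false ≠ []) :
    (PySem.List.sorted (h :: t) (fun x => x) false).getLast hne = t.foldl max h := by
  have hlast_mem : (PySem.List.sorted (h :: t) (fun x => x) false).getLast hne ∈ h :: t := by
    have := List.getLast_mem hne
    rwa [PySem.List.mem_sorted] at this
  have hmax := PySem.List.le_foldl_max t h
  have hfm : t.foldl max h ∈ h :: t := by
    rcases PySem.List.foldl_max_mem t h with h' | h'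
    · rw [h']; simp
    · simp [h']
  have hpw : (PySem.List.sorted (h :: t) (fun x => x) false).Pairwise (fun a b => a ≤ b) :=
    PySem.List.sorted_pairwise (xs := h :: t) (key := fun x => x)
  have h1 : t.foldl max h ≤ (PySem.List.sorted (h :: t) (fun x => x) false).getLast hne :=
    pvLast_ge _ hpw hne _ (by rw [PySem.List.mem_sorted]; exact hfm)
  have h2 : (PySem.List.sorted (h :: t) (fun x => x) false).getLast hne ≤ t.foldl max h := by
    rcases List.mem_cons.mp hlast_mem with he | hm
    · rw [he]; exact hmax.1
    · exact hmax.2 _ hm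
  omega

-- ===== VERDICT (by name: the statement is the Claim_ definition above) =====
theorem etendue_sans_tri_spec : Claim_equal_etendue_sans_tri := by
  intro serie _ hpre
  obtain ⟨h, t, rfl⟩ := List.exists_cons_of_ne_nil hpre
  unfold Spec_etendue_sans_tri etendue_sans_tri etendue_sans_tri_alt
  have hsne : PySem.List.sorted (h :: t) (fun x => x) false ≠ [] := by
    simp [PySem.List.sorted_eq_nil_iff]
  -- A's side: the index loop is a fold over the tail
  have hA :
      (PySem.List.pyRange 1 ((h :: t).length : Int) 1).foldl
        (fun (st : Int × Int) i =>
          let x := PySem.List.pyGetD (h :: t) i 0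
          if x < st.1 then (x, st.2) else if x > st.2 then (st.1, x) else st)
        (PySem.List.pyGetD (h :: t) 0 0, PySem.List.pyGetD (h :: t) 0 0)
      = t.foldl (fun (st : Int × Int) x =>
          if x < st.1 then (x, st.2) else if x > st.2 then (st.1, x) else st)
          (PySem.List.pyGetD (h :: t) 0 0, PySem.List.pyGetD (h :: t) 0 0) := by
    have := PySem.List.foldl_pyRange_pyGetD (a := 1) (xs := h :: t) (d := 0)
      (f := fun (st : Int × Int) x =>
          if x < st.1 then (x, st.2) else if x > st.2 then (st.1, x) else st)
      (init := (PySem.List.pyGetD (h :: t) 0 0, PySem.List.pyGetD (h :: t) 0 0))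
      (by omega)
    simpa using this
  simp only []
  rw [hA]
  rw [PySem.List.pyGetD_zero_cons]
  rw [pvLoopA t h h le_rfl]
  rw [PySem.List.pyGetD_neg_one _ 0 hsne, pvLast_sorted h t hsne]
  have hhead : PySem.List.pyGetD (PySem.List.sorted (h :: t) (fun x => x) false) 0 0
      = t.foldl min h := by
    obtain ⟨m, s, hs⟩ := List.exists_cons_of_ne_nil hsne
    rw [hs, PySem.List.pyGetD_zero_cons]
    have := pvHead_sorted h t
    rwa [hs, List.headI_cons] at this
  rw [hhead]
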